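-- pv_equiv track=rewrite | github.com/DanudeSandstorm/SWEN331-Fuzzer | discover/parse_url.py | parse
-- ===== SOURCE A (Python) =====
-- def parse(urls):
--     #TODO map the urls to params
--     urlInputMap = {}
--     for url in urls:
--         input = url.partition('?')[-1].rpartition('=')[0]
--         if ';' in input:
--             isInput = True
--             newInput = ""
--             for c in input:
--                 if c == '=':
--                     isInput = False
--                 if isInput:
--                     newInput += c
--                 if c == ';':
--                     isInput = True
--                     newInput += " and "
--             input = newInput
--         urlInputMap[url] = input
--     return urlInputMap
-- ===== SOURCE B (Python) =====
-- def parse(urls):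
--     urlInputMap = {}
--     for url in urls:
--         input = url.partition('?')[-1].rpartition('=')[0]
--         if ';' in input:
--             input = ' and '.join(seg.split('=')[0] for seg in input.split(';'))
--         urlInputMap[url] = input
--     return urlInputMap
-- ===== Notes on version B (the rewrite author's own statement) =====
-- stated objective: simpler
-- what changed: The character-by-character isInput state machine is replaced by splitting the query part on ';' and joining each segment's prefix before its first '=' with ' and '.
-- intended difference: On urls whose extracted query part contains ';' with some non-final ';'-segment lacking '=', A's leftover isInput state keeps the stray ';' (e.g. 'x; and y') while B returns the clean 'x and y', which is the intended parameter-name join. — e.g. on parse(["a?x;y=1"]): A returns [("a?x;y=1", "x; and y")], B returns [("a?x;y=1", "x and y")]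
import Mathlib
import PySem

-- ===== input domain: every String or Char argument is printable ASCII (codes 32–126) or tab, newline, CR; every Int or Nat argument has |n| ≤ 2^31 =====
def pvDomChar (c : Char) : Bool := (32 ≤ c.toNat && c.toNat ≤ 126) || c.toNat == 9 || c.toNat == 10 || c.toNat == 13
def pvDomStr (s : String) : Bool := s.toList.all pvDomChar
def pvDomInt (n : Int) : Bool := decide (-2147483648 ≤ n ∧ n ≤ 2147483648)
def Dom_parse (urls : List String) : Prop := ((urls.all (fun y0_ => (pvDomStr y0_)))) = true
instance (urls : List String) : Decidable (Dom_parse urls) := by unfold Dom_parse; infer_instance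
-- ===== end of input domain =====

-- B replaces A's character-level isInput state machine by a split-on-';'/join pass over segments
-- (objective: simpler); on urls where a non-final ';'-segment lacks '=' A keeps a stray ';' and
-- B intentionally drops it (see D_parse below).

-- ===== PORT A =====
-- url.partition('?')[-1].rpartition('=')[0] — this extraction line is verbatim in both Pythons,
-- so both ports (and D_parse, which must describe the extracted query part) share it.
-- Hand-ported step for step (PySem has no partition/rpartition); exact on every input.
def pvExtract (url : List Char) : List Char :=
  let i := PySem.Chars.find url ['?']
  let afterQ := if i = -1 then ([] : List Char) else url.drop (i.toNat + 1)
  let j := PySem.Chars.rfind afterQ ['=']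
  if j = -1 then [] else afterQ.take j.toNat

-- A's inner `for c in input` loop with its isInput/newInput state, transliterated
def parseGo : Bool → List Char → List Char → List Char
  | _, acc, [] => acc
  | isInput, acc, c :: cs =>
    let isInput1 := if c = '=' then false else isInput
    let acc1 := if isInput1 then acc ++ [c] else acc
    if c = ';' then parseGo true (acc1 ++ (" and ".toList)) cs
    else parseGo isInput1 acc1 cs

def parse (urls : List String) : List (String × String) :=
  (urls.foldl (fun m url =>
      let input := pvExtract url.toList
      let input := if PySem.Chars.isIn [';'] input then parseGo true [] input else input
      m.insert url (String.ofList input))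
    (PySem.Dict.empty : PySem.Dict String String)).items

-- ===== PORT B =====
def parse_alt (urls : List String) : List (String × String) :=
  (urls.foldl (fun m url =>
      let input := pvExtract url.toList
      let input := if PySem.Chars.isIn [';'] input then
          PySem.Chars.join (" and ".toList)
            ((PySem.Chars.splitOn input [';']).map (fun seg => (PySem.Chars.splitOn seg ['=']).headD []))
        else input
      m.insert url (String.ofList input))
    (PySem.Dict.empty : PySem.Dict String String)).items

-- ===== PRECONDITION & SPEC =====
-- On urls whose extracted query part contains ';' with some non-final ';'-segment lacking '=',
-- A's leftover isInput state keeps the stray ';' (e.g. "x; and y") while B returns the clean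
-- "x and y", which is the intended ' and '-join of the parameter names.
def pvBadQuery (url : String) : Bool :=
  let t := pvExtract url.toList
  PySem.Chars.isIn [';'] t &&
    (PySem.Chars.splitOn t [';']).dropLast.any (fun seg => !(PySem.Chars.isIn ['='] seg))

def D_parse (urls : List String) : Prop := urls.any pvBadQuery = true
instance (urls : List String) : Decidable (D_parse urls) := by unfold D_parse; infer_instance

def Spec_parse (urls : List String) (out : List (String × String)) : Prop :=
  ¬ D_parse urls → out = parse_alt urls
instance (urls : List String) (out : List (String × String)) : Decidable (Spec_parse urls out) := by
  unfold Spec_parse; infer_instance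

def pvDiffWitness_parse : List String := ["a?x;y=1"]
def pvDiffWitnessOut_parse : (List (String × String)) × (List (String × String)) :=
  ([("a?x;y=1", "x; and y")], [("a?x;y=1", "x and y")])

-- ===== CLAIM (what is proved, stated in full; the proofs are below) =====
def Claim_unchanged_parse : Prop := ∀ (urls : List String), Dom_parse urls → Spec_parse urls (parse urls)
def Claim_changed_parse : Prop := Dom_parse (pvDiffWitness_parse) ∧ D_parse (pvDiffWitness_parse) ∧ parse (pvDiffWitness_parse) = pvDiffWitnessOut_parse.1 ∧ parse_alt (pvDiffWitness_parse) = pvDiffWitnessOut_parse.2 ∧ pvDiffWitnessOut_parse.1 ≠ pvDiffWitnessOut_parse.2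
def Claim_exact_parse : Prop := ∀ (urls : List String), Dom_parse urls → D_parse urls → parse urls ≠ parse_alt urls

-- ===== LEMMAS AND PROOFS =====

-- the per-url values of A and of B
def pvValA (url : String) : List Char :=
  let input := pvExtract url.toList
  if PySem.Chars.isIn [';'] input then parseGo true [] input else input

def pvValB (url : String) : List Char :=
  let input := pvExtract url.toList
  if PySem.Chars.isIn [';'] input then
    PySem.Chars.join (" and ".toList)
      ((PySem.Chars.splitOn input [';']).map (fun seg => (PySem.Chars.splitOn seg ['=']).headD []))
  else input

def pvSplitC (sep : Char) : List Char → List (List Char)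
  | [] => [[]]
  | c :: cs => if c = sep then [] :: pvSplitC sep cs else (pvSplitC sep cs).modifyHead (c :: ·)

theorem pvSplitC_ne_nil : ∀ (sep : Char) (t : List Char), pvSplitC sep t ≠ []
  | sep, [] => by simp [pvSplitC]
  | sep, c :: cs => by
    simp only [pvSplitC]
    split_ifs
    · simp
    · cases h : pvSplitC sep cs with
      | nil => exact absurd h (pvSplitC_ne_nil sep cs)
      | cons a l => simp [List.modifyHead]

theorem splitOn_go_eq (sep : Char) : ∀ (fuel : Nat) (l cur : List Char) (accs : List (List Char)),
    l.length < fuel →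
    PySem.Chars.splitOn.go [sep] fuel l cur accs = accs.reverse ++ (pvSplitC sep l).modifyHead (cur.reverse ++ ·) := by
  intro fuel
  induction fuel with
  | zero => intro l cur accs h; omega
  | succ n ih =>
    intro l cur accs h
    cases l with
    | nil => simp [PySem.Chars.splitOn.go, pvSplitC]
    | cons c rest =>
      by_cases hc : c = sep
      · subst hc
        rw [PySem.Chars.splitOn.go]
        have h1 : rest.length < n := by simpa using h
        simp only [List.isPrefixOf, BEq.rfl, Bool.true_and, if_true, List.length_cons,
          List.length_nil, List.drop_succ_cons, List.drop_zero]
        rw [ih rest [] _ h1]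
        cases hs : pvSplitC c rest with
        | nil => exact absurd hs (pvSplitC_ne_nil c rest)
        | cons a l => simp [pvSplitC, List.modifyHead, hs]
      · rw [PySem.Chars.splitOn.go]
        have h1 : rest.length < n := by simpa using h
        simp only [List.isPrefixOf, Bool.and_eq_true, beq_iff_eq]
        rw [if_neg (by simp; exact fun hh => hc hh.symm)]
        rw [ih rest (c :: cur) _ h1]
        cases hs : pvSplitC sep rest with
        | nil => exact absurd hs (pvSplitC_ne_nil sep rest)
        | cons a l => simp [pvSplitC, if_neg hc, hs, List.modifyHead]

theorem splitOn_eq (t : List Char) (sep : Char) :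
    PySem.Chars.splitOn t [sep] = pvSplitC sep t := by
  rw [PySem.Chars.splitOn, splitOn_go_eq sep (t.length + 1) t [] [] (by omega)]
  cases hs : pvSplitC sep t with
  | nil => exact absurd hs (pvSplitC_ne_nil sep t)
  | cons a l => simp [List.modifyHead]

theorem isIn_single (c : Char) (s : List Char) : PySem.Chars.isIn [c] s = true ↔ c ∈ s := by
  rw [PySem.Chars.isIn_iff_infix]
  constructor
  · rintro ⟨pre, post, rfl⟩; simp
  · intro h
    obtain ⟨pre, post, rfl⟩ := List.append_of_mem h
    exact ⟨pre, post, by simp⟩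

theorem pvSplitC_no_sep (sep : Char) (t : List Char) (h : sep ∉ t) : pvSplitC sep t = [t] := by
  induction t with
  | nil => rfl
  | cons c cs ih =>
    simp only [pvSplitC]
    rw [if_neg (by rintro rfl; exact h (by simp))]
    rw [ih (fun hm => h (by simp [hm]))]
    simp [List.modifyHead]

theorem pvSplitC_append (sep : Char) (a rest : List Char) (h : sep ∉ a) :
    pvSplitC sep (a ++ sep :: rest) = a :: pvSplitC sep rest := by
  induction a with
  | nil => simp [pvSplitC]
  | cons c a' ih =>
    simp only [List.cons_append, pvSplitC]
    rw [if_neg (by rintro rfl; exact h (by simp))]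
    rw [ih (fun hm => h (by simp [hm]))]
    simp [List.modifyHead]

theorem pvSplitC_headD (sep : Char) (t : List Char) :
    (pvSplitC sep t).headD [] = t.takeWhile (· ≠ sep) := by
  induction t with
  | nil => rfl
  | cons c cs ih =>
    simp only [pvSplitC]
    by_cases hc : c = sep
    · subst hc; simp [List.takeWhile]
    · rw [if_neg hc]
      cases hs : pvSplitC sep cs with
      | nil => exact absurd hs (pvSplitC_ne_nil sep cs)
      | cons a l =>
        rw [hs] at ih
        simp only [List.headD_cons] at ih
        simp [List.modifyHead, List.takeWhile, hc, ih, decide_not]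

theorem parseGo_false (a : List Char) (h : ';' ∉ a) : ∀ acc, parseGo false acc a = acc := by
  induction a with
  | nil => intro acc; rfl
  | cons c cs ih =>
    intro acc
    have hc : c ≠ ';' := by rintro rfl; exact h (by simp)
    simp only [parseGo, if_neg hc]
    by_cases he : c = '='
    · simp [he, ih (fun hm => h (by simp [hm]))]
    · simp [if_neg he, ih (fun hm => h (by simp [hm]))]

theorem parseGo_false_semi (a : List Char) (h : ';' ∉ a) : ∀ acc rest,
    parseGo false acc (a ++ ';' :: rest) = parseGo true (acc ++ " and ".toList) rest := by
  induction a with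
  | nil =>
    intro acc rest
    simp [parseGo]
  | cons c cs ih =>
    intro acc rest
    have hc : c ≠ ';' := by rintro rfl; exact h (by simp)
    simp only [List.cons_append, parseGo, if_neg hc]
    by_cases he : c = '='
    · simp [he, ih (fun hm => h (by simp [hm]))]
    · simp [if_neg he, ih (fun hm => h (by simp [hm]))]

theorem parseGo_no_semi (a : List Char) (h : ';' ∉ a) : ∀ acc,
    parseGo true acc a = acc ++ a.takeWhile (· ≠ '=') := by
  induction a with
  | nil => intro acc; simp [parseGo]
  | cons c cs ih =>
    intro acc
    have hc : c ≠ ';' := by rintro rfl; exact h (by simp)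
    simp only [parseGo, if_neg hc]
    by_cases he : c = '='
    · subst he
      simp [parseGo_false cs (fun hm => h (by simp [hm])), List.takeWhile]
    · simp only [if_neg he, if_pos rfl]
      rw [ih (fun hm => h (by simp [hm]))]
      simp [List.takeWhile, he]

theorem parseGo_seg (a : List Char) (h : ';' ∉ a) : ∀ acc rest,
    parseGo true acc (a ++ ';' :: rest) =
      parseGo true (acc ++ a.takeWhile (· ≠ '=') ++ (if '=' ∈ a then [] else [';']) ++ " and ".toList) rest := by
  induction a with
  | nil =>
    intro acc rest
    simp [parseGo]
  | cons c cs ih =>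
    intro acc rest
    have hc : c ≠ ';' := by rintro rfl; exact h (by simp)
    simp only [List.cons_append, parseGo, if_neg hc]
    by_cases he : c = '='
    · subst he
      simp [parseGo_false_semi cs (fun hm => h (by simp [hm])), List.takeWhile]
    · have he' : ¬('=' = c) := fun hh => he hh.symm
      simp only [if_neg he, if_pos rfl]
      rw [ih (fun hm => h (by simp [hm]))]
      simp [List.takeWhile, he, he', List.mem_cons]

theorem first_split {c : Char} : ∀ {t : List Char}, c ∈ t →
    t = t.takeWhile (· ≠ c) ++ c :: (t.dropWhile (· ≠ c)).tail ∧ c ∉ t.takeWhile (· ≠ c) := by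
  intro t
  induction t with
  | nil => intro h; simp at h
  | cons x xs ih =>
    intro h
    by_cases hx : x = c
    · subst hx
      constructor
      · simp [List.takeWhile_cons, List.dropWhile_cons]
      · simp [List.takeWhile_cons]
    · have hc : c ∈ xs := by
        rcases List.mem_cons.mp h with h1 | h1
        · exact absurd h1.symm hx
        · exact h1
      obtain ⟨h1, h2⟩ := ih hc
      have hpx : (decide (x ≠ c)) = true := by simp [hx]
      constructor
      · rw [List.takeWhile_cons, List.dropWhile_cons]
        simp only [hpx, if_true, List.cons_append]
        exact congrArg (x :: ·) h1
      · rw [List.takeWhile_cons]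
        simp only [hpx, if_true, List.mem_cons, not_or]
        exact ⟨fun hh => hx hh.symm, h2⟩

def pvK : List (List Char) → List Char
  | [] => []
  | [s] => s.takeWhile (· ≠ '=')
  | s :: r :: rest => s.takeWhile (· ≠ '=') ++ (if '=' ∈ s then [] else [';']) ++ " and ".toList ++ pvK (r :: rest)

theorem parseGo_eq_pvK : ∀ (n : Nat) (t : List Char), t.length ≤ n → ∀ acc,
    parseGo true acc t = acc ++ pvK (pvSplitC ';' t) := by
  intro n
  induction n with
  | zero =>
    intro t ht acc
    have : t = [] := List.length_eq_zero_iff.mp (Nat.le_zero.mp ht)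
    subst this
    simp [parseGo, pvSplitC, pvK, List.takeWhile]
  | succ n ih =>
    intro t ht acc
    by_cases hs : ';' ∈ t
    · obtain ⟨heq, hna⟩ := first_split hs
      set a := t.takeWhile (· ≠ ';') with ha
      set rest := (t.dropWhile (· ≠ ';')).tail with hr
      have hlen : rest.length ≤ n := by
        have := congrArg List.length heq
        simp at this
        omega
      rw [heq, parseGo_seg a hna acc rest, ih rest hlen, pvSplitC_append ';' a rest hna]
      cases hb : pvSplitC ';' rest with
      | nil => exact absurd hb (pvSplitC_ne_nil ';' rest)
      | cons b l =>
        simp [pvK, List.append_assoc]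
    · rw [parseGo_no_semi t hs, pvSplitC_no_sep ';' t hs]
      simp [pvK]

theorem pvK_eq_join : ∀ (segs : List (List Char)), (∀ seg ∈ segs.dropLast, '=' ∈ seg) → segs ≠ [] →
    pvK segs = PySem.Chars.join (" and ".toList) (segs.map (fun seg => seg.takeWhile (· ≠ '='))) := by
  intro segs
  induction segs with
  | nil => intro _ h; exact absurd rfl h
  | cons s rest ih =>
    intro hg _
    cases rest with
    | nil => simp [pvK, PySem.Chars.join_singleton]
    | cons r rest' =>
      have hs : '=' ∈ s := hg s (by rw [List.dropLast_cons_of_ne_nil (by simp)]; simp)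
      have hg' : ∀ seg ∈ (r :: rest').dropLast, '=' ∈ seg := by
        intro seg hseg
        exact hg seg (by rw [List.dropLast_cons_of_ne_nil (by simp)]; simp [hseg])
      rw [pvK, if_pos hs]
      simp only [List.map_cons]
      rw [PySem.Chars.join_cons_cons]
      rw [ih hg' (by simp)]
      simp [List.append_assoc]

theorem pvK_len_le : ∀ (segs : List (List Char)),
    (PySem.Chars.join (" and ".toList) (segs.map (fun seg => seg.takeWhile (· ≠ '=')))).length ≤ (pvK segs).length := by
  intro segs
  induction segs with
  | nil => simp [pvK, PySem.Chars.join, List.intercalate]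
  | cons s rest ih =>
    cases rest with
    | nil => simp [pvK, PySem.Chars.join_singleton]
    | cons r rest' =>
      simp only [List.map_cons]
      rw [PySem.Chars.join_cons_cons, pvK]
      have h := ih
      simp only [List.map_cons] at h
      simp only [List.length_append]
      split_ifs
      · simp only [List.length_nil]; omega
      · simp only [List.length_cons, List.length_nil]; omega

theorem pvK_len_lt : ∀ (segs : List (List Char)), (∃ seg ∈ segs.dropLast, '=' ∉ seg) →
    (PySem.Chars.join (" and ".toList) (segs.map (fun seg => seg.takeWhile (· ≠ '=')))).length < (pvK segs).length := by
  intro segs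
  induction segs with
  | nil => intro h; simp at h
  | cons s rest ih =>
    intro hb
    cases rest with
    | nil => simp at hb
    | cons r rest' =>
      simp only [List.map_cons]
      rw [PySem.Chars.join_cons_cons, pvK]
      simp only [List.length_append]
      rw [List.dropLast_cons_of_ne_nil (by simp)] at hb
      rcases hb with ⟨seg, hseg, hne⟩
      have hle := pvK_len_le (r :: rest')
      simp only [List.map_cons] at hle
      rcases List.mem_cons.mp hseg with h1 | h1
      · subst h1
        rw [if_neg hne]
        simp only [List.length_cons, List.length_nil]
        omega
      · have hlt := ih ⟨seg, h1, hne⟩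
        simp only [List.map_cons] at hlt
        split_ifs
        · simp only [List.length_nil]; omega
        · simp only [List.length_cons, List.length_nil]; omega

theorem headD_splitOn_eq (seg : List Char) :
    (PySem.Chars.splitOn seg ['=']).headD [] = seg.takeWhile (· ≠ '=') := by
  rw [splitOn_eq, pvSplitC_headD]

theorem val_eq_of_good (u : String) (h : pvBadQuery u = false) : pvValA u = pvValB u := by
  unfold pvValA pvValB
  unfold pvBadQuery at h
  by_cases hin : PySem.Chars.isIn [';'] (pvExtract u.toList) = true
  · simp only [hin, Bool.true_and, if_true] at h ⊢
    rw [splitOn_eq] at h ⊢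
    have hg : ∀ seg ∈ (pvSplitC ';' (pvExtract u.toList)).dropLast, '=' ∈ seg := by
      intro seg hseg
      have hf := List.any_eq_false.mp h seg hseg
      simp only [Bool.not_eq_true', Bool.not_eq_false] at hf
      exact (isIn_single '=' seg).mp hf
    rw [parseGo_eq_pvK (pvExtract u.toList).length _ le_rfl []]
    rw [pvK_eq_join _ hg (pvSplitC_ne_nil ';' _), List.nil_append]
    congr 1
    apply List.map_congr_left
    intro seg _
    exact (headD_splitOn_eq seg).symm
  · simp only [Bool.not_eq_true] at hin
    simp [hin]

theorem val_ne_of_bad (u : String) (h : pvBadQuery u = true) : pvValA u ≠ pvValB u := by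
  unfold pvValA pvValB
  unfold pvBadQuery at h
  rw [Bool.and_eq_true] at h
  obtain ⟨hin, hany⟩ := h
  simp only [hin, if_true]
  rw [splitOn_eq] at hany ⊢
  obtain ⟨seg, hseg, hbad⟩ := List.any_eq_true.mp hany
  have hnm : '=' ∉ seg := by
    simp only [Bool.not_eq_true'] at hbad
    intro hm
    rw [(isIn_single '=' seg).mpr hm] at hbad
    cases hbad
  rw [parseGo_eq_pvK (pvExtract u.toList).length _ le_rfl [], List.nil_append]
  intro heq
  have hlt := pvK_len_lt (pvSplitC ';' (pvExtract u.toList)) ⟨seg, hseg, hnm⟩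
  rw [show ((pvSplitC ';' (pvExtract u.toList)).map (fun seg => seg.takeWhile (· ≠ '='))) =
        ((pvSplitC ';' (pvExtract u.toList)).map (fun seg => (PySem.Chars.splitOn seg ['=']).headD [])) from
      List.map_congr_left (fun seg _ => (headD_splitOn_eq seg).symm)] at hlt
  rw [heq] at hlt
  omega

theorem fold_get? (f : String → List Char) : ∀ (urls : List String) (m : PySem.Dict String String) (x : String),
    (urls.foldl (fun m url => m.insert url (String.ofList (f url))) m).get? x =
      if x ∈ urls then some (String.ofList (f x)) else m.get? x := by
  intro urls
  induction urls with
  | nil => intro m x; simp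
  | cons u rest ih =>
    intro m x
    simp only [List.foldl_cons, ih]
    by_cases hx : x ∈ rest
    · simp [hx]
    · by_cases hxu : x = u
      · subst hxu
        simp [hx, PySem.Dict.get?_insert_self]
      · simp [hx, hxu, PySem.Dict.get?_insert_of_ne _ _ hxu]

theorem fold_congr (f g : String → List Char) : ∀ (urls : List String) (m : PySem.Dict String String),
    (∀ u ∈ urls, f u = g u) →
    urls.foldl (fun m url => m.insert url (String.ofList (f url))) m =
    urls.foldl (fun m url => m.insert url (String.ofList (g url))) m := by
  intro urls
  induction urls with
  | nil => intro m _; rfl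
  | cons u rest ih =>
    intro m h
    simp only [List.foldl_cons]
    rw [h u (by simp), ih _ (fun x hx => h x (by simp [hx]))]

theorem parse_eq_fold (urls : List String) :
    parse urls = (urls.foldl (fun m url => m.insert url (String.ofList (pvValA url))) (PySem.Dict.empty : PySem.Dict String String)).items := by
  rfl

theorem parse_alt_eq_fold (urls : List String) :
    parse_alt urls = (urls.foldl (fun m url => m.insert url (String.ofList (pvValB url))) (PySem.Dict.empty : PySem.Dict String String)).items := by
  rfl

-- ===== VERDICT (by name: the statement is the Claim_ definition above) =====
theorem parse_spec : Claim_unchanged_parse := by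
  intro urls _ hnd
  rw [parse_eq_fold, parse_alt_eq_fold, fold_congr pvValA pvValB urls _ ?_]
  intro u hu
  apply val_eq_of_good
  by_contra hb
  simp only [Bool.not_eq_false] at hb
  exact hnd (List.any_eq_true.mpr ⟨u, hu, hb⟩)

theorem parse_changed : Claim_changed_parse := by
  unfold Claim_changed_parse; decide

theorem parse_tight : Claim_exact_parse := by
  intro urls _ hd heq
  obtain ⟨u, hu, hbad⟩ := List.any_eq_true.mp hd
  have h1 := fold_get? pvValA urls (PySem.Dict.empty : PySem.Dict String String) u
  have h2 := fold_get? pvValB urls (PySem.Dict.empty : PySem.Dict String String) u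
  rw [if_pos hu] at h1 h2
  have hitems : (urls.foldl (fun m url => m.insert url (String.ofList (pvValA url))) (PySem.Dict.empty : PySem.Dict String String)).items =
      (urls.foldl (fun m url => m.insert url (String.ofList (pvValB url))) (PySem.Dict.empty : PySem.Dict String String)).items := by
    rw [← parse_eq_fold, ← parse_alt_eq_fold]; exact heq
  have hg : (urls.foldl (fun m url => m.insert url (String.ofList (pvValA url))) (PySem.Dict.empty : PySem.Dict String String)).get? u =
      (urls.foldl (fun m url => m.insert url (String.ofList (pvValB url))) (PySem.Dict.empty : PySem.Dict String String)).get? u := by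
    simp only [PySem.Dict.get?]
    rw [hitems]
  rw [h1, h2] at hg
  have hs := Option.some.inj hg
  have hl := congrArg String.toList hs
  simp only [String.toList_ofList] at hl
  exact val_ne_of_bad u hbad hl
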